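-- pv_equiv track=rewrite | github.com/Babson-Python-Spring2026/python-jack-spring2026 | classes/04-15 W/Homeworkdue4_22.py | num_decreasing_runs
-- ===== SOURCE A (Python) =====
-- def num_decreasing_runs(nums):
--     count = 0
--     current = 1
--
--     for i in range(1, len(nums)):
--         if nums[i] < nums[i - 1]:
--             current += 1
--         else:
--             if current >= 2:
--                 count += 1
--             current = 1
--
--     if current >= 2:
--         count += 1
--
--     return count
-- ===== SOURCE B (Python) =====
-- def num_decreasing_runs(nums):
--     # Count the starts of maximal descent blocks: position i begins a run
--     # iff nums[i] < nums[i-1] and the previous adjacent pair was not a descent.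
--     return sum(
--         1
--         for i in range(1, len(nums))
--         if nums[i] < nums[i - 1] and (i == 1 or nums[i - 1] >= nums[i - 2])
--     )
-- ===== Notes on version B (the rewrite author's own statement) =====
-- stated objective: simpler
-- what changed: Replaces the run-length accumulator with end-of-run flushes by a single generator sum that counts rising edges of the descent predicate (positions where a descent begins), needing no counter state or tail flush.
import Mathlib
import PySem

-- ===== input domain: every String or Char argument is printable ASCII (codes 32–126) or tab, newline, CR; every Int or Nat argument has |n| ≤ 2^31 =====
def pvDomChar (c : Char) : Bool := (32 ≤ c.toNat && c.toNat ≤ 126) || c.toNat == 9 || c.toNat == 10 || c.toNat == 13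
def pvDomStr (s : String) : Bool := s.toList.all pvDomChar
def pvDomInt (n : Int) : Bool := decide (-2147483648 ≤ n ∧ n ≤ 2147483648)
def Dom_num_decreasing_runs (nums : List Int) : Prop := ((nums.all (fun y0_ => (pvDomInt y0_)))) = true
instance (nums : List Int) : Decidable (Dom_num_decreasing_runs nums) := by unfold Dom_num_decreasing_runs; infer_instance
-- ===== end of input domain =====

-- B replaces A's run-length accumulator with end-of-run flushes by a stateless count of descent starts; objective: simpler.

-- ===== PORT A =====
-- A: state (count, current); bump `current` on each descent, flush a run of length ≥ 2 otherwise, plus a final flush.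
def num_decreasing_runs (nums : List Int) : Int :=
  let st := (PySem.List.pyRange 1 (nums.length : Int) 1).foldl
    (fun (s : Int × Int) i =>
      if PySem.List.pyGetD nums i 0 < PySem.List.pyGetD nums (i - 1) 0 then
        (s.1, s.2 + 1)
      else if s.2 ≥ 2 then (s.1 + 1, 1) else (s.1, 1))
    (0, 1)
  if st.2 ≥ 2 then st.1 + 1 else st.1

-- ===== PORT B =====
-- B: count the indices i where a descent begins (descent at i, no descent at the previous pair).
def num_decreasing_runs_alt (nums : List Int) : Int :=
  (PySem.List.pyRange 1 (nums.length : Int) 1).foldl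
    (fun (acc : Int) i =>
      if PySem.List.pyGetD nums i 0 < PySem.List.pyGetD nums (i - 1) 0 ∧
         (i = 1 ∨ PySem.List.pyGetD nums (i - 1) 0 ≥ PySem.List.pyGetD nums (i - 2) 0)
      then acc + 1 else acc)
    0

-- ===== PRECONDITION & SPEC =====
def Spec_num_decreasing_runs (nums : List Int) (out : Int) : Prop := out = num_decreasing_runs_alt nums
instance (nums : List Int) (out : Int) : Decidable (Spec_num_decreasing_runs nums out) := by unfold Spec_num_decreasing_runs; infer_instance

-- ===== CLAIM (what is proved, stated in full; the proofs are below) =====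
def Claim_equal_num_decreasing_runs : Prop := ∀ (nums : List Int), Dom_num_decreasing_runs nums → Spec_num_decreasing_runs nums (num_decreasing_runs nums)

-- ===== LEMMAS AND PROOFS =====

-- Proof-only names for the two loop bodies and the partial folds over indices 1..n-1.
def pvStepA (nums : List Int) (s : Int × Int) (i : Int) : Int × Int :=
  if PySem.List.pyGetD nums i 0 < PySem.List.pyGetD nums (i - 1) 0 then (s.1, s.2 + 1)
  else if s.2 ≥ 2 then (s.1 + 1, 1) else (s.1, 1)

def pvStepB (nums : List Int) (acc : Int) (i : Int) : Int :=
  if PySem.List.pyGetD nums i 0 < PySem.List.pyGetD nums (i - 1) 0 ∧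
     (i = 1 ∨ PySem.List.pyGetD nums (i - 1) 0 ≥ PySem.List.pyGetD nums (i - 2) 0)
  then acc + 1 else acc

def pvFoldA (nums : List Int) (n : Int) : Int × Int :=
  (PySem.List.pyRange 1 n 1).foldl (pvStepA nums) (0, 1)

def pvFoldB (nums : List Int) (n : Int) : Int :=
  (PySem.List.pyRange 1 n 1).foldl (pvStepB nums) 0

theorem pvA_eq (nums : List Int) : num_decreasing_runs nums =
    (if (pvFoldA nums (nums.length : Int)).2 ≥ 2 then (pvFoldA nums (nums.length : Int)).1 + 1
     else (pvFoldA nums (nums.length : Int)).1) := rfl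

theorem pvB_eq (nums : List Int) : num_decreasing_runs_alt nums = pvFoldB nums (nums.length : Int) := rfl

-- Loop invariant after processing indices 1..n-1: A's `current` ≥ 1; `current` ≥ 2 exactly when
-- the last processed pair was a descent; A's count plus the pending flush equals B's count.
theorem pv_inv (nums : List Int) (n : Nat) (h1 : 1 ≤ n) (h2 : n ≤ nums.length) :
    (pvFoldA nums (n : Int)).2 ≥ 1 ∧
    ((pvFoldA nums (n : Int)).2 ≥ 2 ↔ (2 ≤ n ∧
       PySem.List.pyGetD nums ((n : Int) - 1) 0 < PySem.List.pyGetD nums ((n : Int) - 2) 0)) ∧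
    (pvFoldA nums (n : Int)).1 + (if (pvFoldA nums (n : Int)).2 ≥ 2 then 1 else 0)
      = pvFoldB nums (n : Int) := by
  induction n with
  | zero => omega
  | succ m ih =>
    by_cases hm : m = 0
    · subst hm
      have hnil : PySem.List.pyRange (1 : Int) ((0 + 1 : Nat) : Int) 1 = [] :=
        PySem.List.pyRange_one_eq_nil (by norm_num)
      simp only [pvFoldA, pvFoldB, hnil, List.foldl_nil]
      norm_num
    · have hm1 : 1 ≤ m := by omega
      have hstep : PySem.List.pyRange (1 : Int) ((m + 1 : Nat) : Int) 1
          = PySem.List.pyRange 1 (m : Int) 1 ++ [(m : Int)] := by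
        rw [show ((m + 1 : Nat) : Int) = (m : Int) + 1 by push_cast; ring]
        exact PySem.List.pyRange_one_succ_right (by exact_mod_cast hm1)
      have hA : pvFoldA nums ((m + 1 : Nat) : Int) = pvStepA nums (pvFoldA nums (m : Int)) (m : Int) := by
        simp only [pvFoldA, hstep, List.foldl_append, List.foldl_cons, List.foldl_nil]
      have hB : pvFoldB nums ((m + 1 : Nat) : Int) = pvStepB nums (pvFoldB nums (m : Int)) (m : Int) := by
        simp only [pvFoldB, hstep, List.foldl_append, List.foldl_cons, List.foldl_nil]
      obtain ⟨hc1, hc2, hc3⟩ := ih hm1 (by omega)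
      rw [hA, hB, show ((m + 1 : Nat) : Int) - 1 = (m : Int) by push_cast; ring,
          show ((m + 1 : Nat) : Int) - 2 = (m : Int) - 1 by push_cast; ring]
      by_cases hd : PySem.List.pyGetD nums (m : Int) 0 < PySem.List.pyGetD nums ((m : Int) - 1) 0
      · have hA' : pvStepA nums (pvFoldA nums (m : Int)) (m : Int)
            = ((pvFoldA nums (m : Int)).1, (pvFoldA nums (m : Int)).2 + 1) := by
          simp only [pvStepA]; rw [if_pos hd]
        rw [hA']
        by_cases he : (pvFoldA nums (m : Int)).2 ≥ 2
        · obtain ⟨h2m, hyz⟩ := hc2.mp he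
          have hBc : ¬ (PySem.List.pyGetD nums (m : Int) 0 < PySem.List.pyGetD nums ((m : Int) - 1) 0 ∧
              ((m : Int) = 1 ∨ PySem.List.pyGetD nums ((m : Int) - 1) 0 ≥ PySem.List.pyGetD nums ((m : Int) - 2) 0)) := by
            rintro ⟨-, (h1' | hge)⟩
            · omega
            · exact absurd hyz (not_lt.mpr hge)
          have hB' : pvStepB nums (pvFoldB nums (m : Int)) (m : Int) = pvFoldB nums (m : Int) := by
            simp only [pvStepB]; rw [if_neg hBc]
          rw [hB', if_pos he] at *
          refine ⟨by omega, ?_, ?_⟩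
          · constructor
            · intro _; exact ⟨by omega, hd⟩
            · intro _; omega
          · rw [if_pos (show (pvFoldA nums (m : Int)).2 + 1 ≥ 2 by omega)]
            omega
        · have hBc : PySem.List.pyGetD nums (m : Int) 0 < PySem.List.pyGetD nums ((m : Int) - 1) 0 ∧
              ((m : Int) = 1 ∨ PySem.List.pyGetD nums ((m : Int) - 1) 0 ≥ PySem.List.pyGetD nums ((m : Int) - 2) 0) := by
            refine ⟨hd, ?_⟩
            by_cases h2m : 2 ≤ m
            · right
              by_contra hlt
              exact he (hc2.mpr ⟨h2m, lt_of_not_ge hlt⟩)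
            · left; omega
          have hB' : pvStepB nums (pvFoldB nums (m : Int)) (m : Int) = pvFoldB nums (m : Int) + 1 := by
            simp only [pvStepB]; rw [if_pos hBc]
          rw [hB', if_neg he] at *
          refine ⟨by omega, ?_, ?_⟩
          · constructor
            · intro _; exact ⟨by omega, hd⟩
            · intro _; omega
          · rw [if_pos (show (pvFoldA nums (m : Int)).2 + 1 ≥ 2 by omega)]
            omega
      · have hBc : ¬ (PySem.List.pyGetD nums (m : Int) 0 < PySem.List.pyGetD nums ((m : Int) - 1) 0 ∧
            ((m : Int) = 1 ∨ PySem.List.pyGetD nums ((m : Int) - 1) 0 ≥ PySem.List.pyGetD nums ((m : Int) - 2) 0)) :=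
          fun h => hd h.1
        have hB' : pvStepB nums (pvFoldB nums (m : Int)) (m : Int) = pvFoldB nums (m : Int) := by
          simp only [pvStepB]; rw [if_neg hBc]
        rw [hB']
        by_cases he : (pvFoldA nums (m : Int)).2 ≥ 2
        · have hA' : pvStepA nums (pvFoldA nums (m : Int)) (m : Int)
              = ((pvFoldA nums (m : Int)).1 + 1, 1) := by
            simp only [pvStepA]; rw [if_neg hd, if_pos he]
          rw [hA', if_pos he] at *
          refine ⟨by omega, ?_, ?_⟩
          · constructor
            · intro h'; omega
            · rintro ⟨-, hlt⟩; exact absurd hlt hd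
          · rw [if_neg (show ¬ ((1 : Int) ≥ 2) by omega)]
            omega
        · have hA' : pvStepA nums (pvFoldA nums (m : Int)) (m : Int)
              = ((pvFoldA nums (m : Int)).1, 1) := by
            simp only [pvStepA]; rw [if_neg hd, if_neg he]
          rw [hA', if_neg he] at *
          refine ⟨by omega, ?_, ?_⟩
          · constructor
            · intro h'; omega
            · rintro ⟨-, hlt⟩; exact absurd hlt hd
          · rw [if_neg (show ¬ ((1 : Int) ≥ 2) by omega)]
            omega

-- ===== VERDICT (by name: the statement is the Claim_ definition above) =====
theorem num_decreasing_runs_spec : Claim_equal_num_decreasing_runs := by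
  intro nums _
  unfold Spec_num_decreasing_runs
  rw [pvA_eq, pvB_eq]
  by_cases hlen : nums.length = 0
  · rw [hlen]
    have hnil : PySem.List.pyRange (1 : Int) ((0 : Nat) : Int) 1 = [] :=
      PySem.List.pyRange_one_eq_nil (by norm_num)
    simp only [pvFoldA, pvFoldB, hnil, List.foldl_nil]
    norm_num
  · obtain ⟨-, -, h3⟩ := pv_inv nums nums.length (by omega) le_rfl
    by_cases he : (pvFoldA nums (nums.length : Int)).2 ≥ 2
    · rw [if_pos he] at *; omega
    · rw [if_neg he] at *; omega
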